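-- pv_equiv track=rewrite | github.com/shiva0403/python_1 | practice/guard_rails.py | _process_rails_outputs
-- ===== SOURCE A (Python) =====
-- def _process_rails_outputs(rails_output: dict) -> str:
--     """
--     Determine whether checks passed or failed, and return the boolean value.
--
--     Args:
--         rails_output: A dictionary containing the validated output of LLMRails
--
--     Returns:
--         str: Result of the validation process
--     """
--     if all(val.lower() == "pass" for val in rails_output.values()):
--         return "pass"
--     elif all(val.lower() == "greeting" for val in rails_output.values()):
--         return "greeting"
--     elif all(val.lower() == "confirmation" for val in rails_output.values()):
--         return "confirmation"
--     elif all(val.lower() == "support" for val in rails_output.values()):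
--         return "support"
--     elif all(val.lower() == "unsafe" for val in rails_output.values()):
--         return "unsafe"
--     else:
--      return "fail"
-- ===== SOURCE B (Python) =====
-- def _process_rails_outputs(rails_output: dict) -> str:
--     vals = iter(rails_output.values())
--     first = next(vals, None)
--     if first is None:
--         return "pass"
--     cat = first.lower()
--     for v in vals:
--         if v.lower() != cat:
--             return "fail"
--     return cat if cat in ("pass", "greeting", "confirmation", "support", "unsafe") else "fail"
-- ===== Notes on version B (the rewrite author's own statement) =====
-- stated objective: alternative
-- what changed: A runs five separate all(v.lower()==cat) scans, one per category in priority order; B makes a single early-exit pass: it lowercases the first value, returns 'fail' at the first value that differs from it, and otherwise returns that uniform value if it is one of the five categories ('pass' for the empty dict), so no per-category scans and no priority loop exist in B.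
import Mathlib
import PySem

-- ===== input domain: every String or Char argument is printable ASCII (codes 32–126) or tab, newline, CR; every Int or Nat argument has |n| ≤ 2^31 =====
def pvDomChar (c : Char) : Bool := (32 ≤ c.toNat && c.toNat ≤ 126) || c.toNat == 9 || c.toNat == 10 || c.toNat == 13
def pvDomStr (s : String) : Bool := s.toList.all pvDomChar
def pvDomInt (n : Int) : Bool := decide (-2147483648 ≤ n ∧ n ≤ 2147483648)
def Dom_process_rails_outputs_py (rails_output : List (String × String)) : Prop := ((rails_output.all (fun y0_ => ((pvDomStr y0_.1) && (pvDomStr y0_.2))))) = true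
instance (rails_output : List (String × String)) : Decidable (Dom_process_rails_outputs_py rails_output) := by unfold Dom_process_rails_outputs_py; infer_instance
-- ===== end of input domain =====

-- B replaces A's five per-category all() scans by one early-exit pass that checks
-- uniformity against the first value's lowercasing, then classifies that value
-- (objective: alternative single-pass decomposition).

-- ===== PORT A =====
def process_rails_outputs_py (rails_output : List (String × String)) : String :=
  let vals := (PySem.Dict.ofList rails_output).values
  if vals.all (fun v => PySem.Str.lower v == "pass") then "pass"
  else if vals.all (fun v => PySem.Str.lower v == "greeting") then "greeting"
  else if vals.all (fun v => PySem.Str.lower v == "confirmation") then "confirmation"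
  else if vals.all (fun v => PySem.Str.lower v == "support") then "support"
  else if vals.all (fun v => PySem.Str.lower v == "unsafe") then "unsafe"
  else "fail"

-- ===== PORT B =====
-- the for-loop of Source B: "fail" at the first value whose lowercasing differs from cat;
-- after the loop, cat if it is one of the five categories, else "fail"
def prsLoop (cat : String) : List String → String
  | [] => if ["pass", "greeting", "confirmation", "support", "unsafe"].contains cat then cat else "fail"
  | v :: rest => if PySem.Str.lower v != cat then "fail" else prsLoop cat rest

def process_rails_outputs_py_alt (rails_output : List (String × String)) : String :=
  match (PySem.Dict.ofList rails_output).values with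
  | [] => "pass"
  | first :: rest => prsLoop (PySem.Str.lower first) rest

-- ===== PRECONDITION & SPEC =====
def Spec_process_rails_outputs_py (rails_output : List (String × String)) (out : String) : Prop := out = process_rails_outputs_py_alt rails_output
instance (rails_output : List (String × String)) (out : String) : Decidable (Spec_process_rails_outputs_py rails_output out) := by unfold Spec_process_rails_outputs_py; infer_instance

-- ===== CLAIM (what is proved, stated in full; the proofs are below) =====
def Claim_equal_process_rails_outputs_py : Prop := ∀ (rails_output : List (String × String)), Dom_process_rails_outputs_py rails_output → Spec_process_rails_outputs_py rails_output (process_rails_outputs_py rails_output)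

-- ===== LEMMAS AND PROOFS =====

-- B's loop, characterised: it returns the classification of cat iff the rest is uniformly cat
lemma prsLoop_eq (cat : String) (rest : List String) :
    prsLoop cat rest =
      if rest.all (fun v => PySem.Str.lower v == cat) then
        (if ["pass", "greeting", "confirmation", "support", "unsafe"].contains cat then cat else "fail")
      else "fail" := by
  induction rest with
  | nil => simp [prsLoop]
  | cons v rest ih =>
      simp only [prsLoop, List.all_cons, bne, ih]
      by_cases h : PySem.Str.lower v == cat <;> simp [h]

-- ===== VERDICT (by name: the statement is the Claim_ definition above) =====
theorem process_rails_outputs_py_spec : Claim_equal_process_rails_outputs_py := by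
  intro rails_output _
  unfold Spec_process_rails_outputs_py process_rails_outputs_py process_rails_outputs_py_alt
  cases hv : (PySem.Dict.ofList rails_output).values with
  | nil => simp
  | cons first rest =>
      simp only [prsLoop_eq, List.all_cons]
      by_cases hr : rest.all (fun v => PySem.Str.lower v == PySem.Str.lower first)
      · -- rest uniform: each of A's tests reduces to "lower first == cat"
        by_cases h1 : PySem.Str.lower first = "pass"
        · simp [h1]
        · by_cases h2 : PySem.Str.lower first = "greeting"
          · have : ∀ v ∈ rest, PySem.Str.lower v = "greeting" := by
              intro v hv'; have := (List.all_eq_true.1 hr) v hv'; simp at this; rw [this, h2]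
            simp [h2]
          · by_cases h3 : PySem.Str.lower first = "confirmation"
            · have : ∀ v ∈ rest, PySem.Str.lower v = "confirmation" := by
                intro v hv'; have := (List.all_eq_true.1 hr) v hv'; simp at this; rw [this, h3]
              simp [h3]
            · by_cases h4 : PySem.Str.lower first = "support"
              · have : ∀ v ∈ rest, PySem.Str.lower v = "support" := by
                  intro v hv'; have := (List.all_eq_true.1 hr) v hv'; simp at this; rw [this, h4]
                simp [h4]
              · by_cases h5 : PySem.Str.lower first = "unsafe"
                · have : ∀ v ∈ rest, PySem.Str.lower v = "unsafe" := by
                    intro v hv'; have := (List.all_eq_true.1 hr) v hv'; simp at this; rw [this, h5]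
                  simp [h5]
                · simp [h1, h2, h3, h4, h5, hr]
      · -- rest not uniform: every one of A's five tests fails, and B's loop fails too
        have hfail : ∀ cat : String, ¬ ((PySem.Str.lower first == cat) = true ∧
            rest.all (fun v => PySem.Str.lower v == cat) = true) := by
          rintro cat ⟨hc, hall⟩
          apply hr
          simp only [beq_iff_eq] at hc
          rw [hc]; exact hall
        have h1 := hfail "pass"; have h2 := hfail "greeting"; have h3 := hfail "confirmation"
        have h4 := hfail "support"; have h5 := hfail "unsafe"
        simp only [not_and] at h1 h2 h3 h4 h5
        simp only [Bool.and_eq_true]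
        rw [if_neg, if_neg, if_neg, if_neg, if_neg, if_neg hr] <;>
          · rintro ⟨hc, hall⟩
            first
              | exact h1 hc hall | exact h2 hc hall | exact h3 hc hall
              | exact h4 hc hall | exact h5 hc hall
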